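-- pv_equiv track=rewrite | github.com/dongwoLee/Mosquito_MultiLinearRegression | compareTest.py | changeToLevel
-- ===== SOURCE A (Python) =====
-- def changeToLevel(list):
--     level=[]
--     for i in range(len(list)):
--         if(0<=list[i]<21):
--             level.append("1")
--         elif(21<=list[i]<41):
--             level.append("2")
--         elif (41 <= list[i] <81):
--             level.append("3")
--         elif (81 <= list[i] < 161):
--             level.append("4")
--         elif (161 <= list[i] < 321):
--             level.append("5")
--         elif (321 <= list[i] <641):
--             level.append("6")
--         elif (641 <= list[i] < 1281):
--             level.append("7")
--         elif (list[i]>=1281):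
--             level.append("8")
--         else:
--             level.append("1") # <0 is predicting level 1
--
--     return level
-- ===== SOURCE B (Python) =====
-- def changeToLevel(list):
--     # Threshold table instead of an eight-branch if-chain: the level is
--     # 1 + number of boundaries the value has reached.
--     boundaries = [21, 41, 81, 161, 321, 641, 1281]
--     return [str(1 + sum(1 for b in boundaries if v >= b)) for v in list]
-- ===== Notes on version B (the rewrite author's own statement) =====
-- stated objective: idiomatic
-- what changed: Replaced the eight-branch monotonic if/elif chain over indices with a comprehension that computes each bucket as 1 plus the count of reached thresholds in a boundary table.
import Mathlib
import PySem

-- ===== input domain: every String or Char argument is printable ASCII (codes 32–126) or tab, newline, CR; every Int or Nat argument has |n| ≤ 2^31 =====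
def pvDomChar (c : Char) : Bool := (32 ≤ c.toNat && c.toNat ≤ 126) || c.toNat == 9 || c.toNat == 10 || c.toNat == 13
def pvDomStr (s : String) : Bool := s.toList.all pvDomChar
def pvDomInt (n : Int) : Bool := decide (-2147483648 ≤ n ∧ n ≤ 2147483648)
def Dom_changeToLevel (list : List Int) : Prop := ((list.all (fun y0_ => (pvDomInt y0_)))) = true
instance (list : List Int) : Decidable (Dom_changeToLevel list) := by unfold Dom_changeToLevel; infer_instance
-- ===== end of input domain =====

-- B replaces A's eight-branch if/elif chain with a boundary table: level = 1 + count of reached thresholds (idiomatic, same cost).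

-- ===== PORT A =====
-- A: loop over the list in order, appending the bucket string chosen by the if/elif chain.
def changeToLevel (list : List Int) : List String :=
  list.foldl (fun level x =>
    level ++ [ if 0 ≤ x ∧ x < 21 then "1"
      else if 21 ≤ x ∧ x < 41 then "2"
      else if 41 ≤ x ∧ x < 81 then "3"
      else if 81 ≤ x ∧ x < 161 then "4"
      else if 161 ≤ x ∧ x < 321 then "5"
      else if 321 ≤ x ∧ x < 641 then "6"
      else if 641 ≤ x ∧ x < 1281 then "7"
      else if x ≥ 1281 then "8"
      else "1" ]) []

-- ===== PORT B =====
-- B: comprehension; each element maps to str(1 + number of boundaries it has reached).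
def changeToLevel_alt (list : List Int) : List String :=
  list.map (fun v =>
    PySem.Int.toStr (1 + ([21, 41, 81, 161, 321, 641, 1281].foldl
      (fun acc b => if v ≥ b then acc + 1 else acc) (0 : Int))))

-- ===== PRECONDITION & SPEC =====
def Spec_changeToLevel (list : List Int) (out : List String) : Prop := out = changeToLevel_alt list
instance (list : List Int) (out : List String) : Decidable (Spec_changeToLevel list out) := by unfold Spec_changeToLevel; infer_instance

-- ===== CLAIM (what is proved, stated in full; the proofs are below) =====
def Claim_equal_changeToLevel : Prop := ∀ (list : List Int), Dom_changeToLevel list → Spec_changeToLevel list (changeToLevel list)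

-- ===== LEMMAS AND PROOFS =====

def pvStepA (x : Int) : String :=
  if 0 ≤ x ∧ x < 21 then "1"
  else if 21 ≤ x ∧ x < 41 then "2"
  else if 41 ≤ x ∧ x < 81 then "3"
  else if 81 ≤ x ∧ x < 161 then "4"
  else if 161 ≤ x ∧ x < 321 then "5"
  else if 321 ≤ x ∧ x < 641 then "6"
  else if 641 ≤ x ∧ x < 1281 then "7"
  else if x ≥ 1281 then "8"
  else "1"

def pvStepB (v : Int) : String :=
  PySem.Int.toStr (1 + ([21, 41, 81, 161, 321, 641, 1281].foldl
    (fun acc b => if v ≥ b then acc + 1 else acc) (0 : Int)))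

lemma pvStep_eq (x : Int) : pvStepA x = pvStepB x := by
  unfold pvStepA pvStepB
  split_ifs with h1 h2 h3 h4 h5 h6 h7 h8
  · simp only [List.foldl]
    rw [if_neg (by omega : ¬ x ≥ 21), if_neg (by omega : ¬ x ≥ 41), if_neg (by omega : ¬ x ≥ 81), if_neg (by omega : ¬ x ≥ 161), if_neg (by omega : ¬ x ≥ 321), if_neg (by omega : ¬ x ≥ 641), if_neg (by omega : ¬ x ≥ 1281)]; rfl
  · simp only [List.foldl]
    rw [if_pos (by omega : x ≥ 21), if_neg (by omega : ¬ x ≥ 41), if_neg (by omega : ¬ x ≥ 81), if_neg (by omega : ¬ x ≥ 161), if_neg (by omega : ¬ x ≥ 321), if_neg (by omega : ¬ x ≥ 641), if_neg (by omega : ¬ x ≥ 1281)]; rfl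
  · simp only [List.foldl]
    rw [if_pos (by omega : x ≥ 21), if_pos (by omega : x ≥ 41), if_neg (by omega : ¬ x ≥ 81), if_neg (by omega : ¬ x ≥ 161), if_neg (by omega : ¬ x ≥ 321), if_neg (by omega : ¬ x ≥ 641), if_neg (by omega : ¬ x ≥ 1281)]; rfl
  · simp only [List.foldl]
    rw [if_pos (by omega : x ≥ 21), if_pos (by omega : x ≥ 41), if_pos (by omega : x ≥ 81), if_neg (by omega : ¬ x ≥ 161), if_neg (by omega : ¬ x ≥ 321), if_neg (by omega : ¬ x ≥ 641), if_neg (by omega : ¬ x ≥ 1281)]; rfl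
  · simp only [List.foldl]
    rw [if_pos (by omega : x ≥ 21), if_pos (by omega : x ≥ 41), if_pos (by omega : x ≥ 81), if_pos (by omega : x ≥ 161), if_neg (by omega : ¬ x ≥ 321), if_neg (by omega : ¬ x ≥ 641), if_neg (by omega : ¬ x ≥ 1281)]; rfl
  · simp only [List.foldl]
    rw [if_pos (by omega : x ≥ 21), if_pos (by omega : x ≥ 41), if_pos (by omega : x ≥ 81), if_pos (by omega : x ≥ 161), if_pos (by omega : x ≥ 321), if_neg (by omega : ¬ x ≥ 641), if_neg (by omega : ¬ x ≥ 1281)]; rfl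
  · simp only [List.foldl]
    rw [if_pos (by omega : x ≥ 21), if_pos (by omega : x ≥ 41), if_pos (by omega : x ≥ 81), if_pos (by omega : x ≥ 161), if_pos (by omega : x ≥ 321), if_pos (by omega : x ≥ 641), if_neg (by omega : ¬ x ≥ 1281)]; rfl
  · simp only [List.foldl]
    rw [if_pos (by omega : x ≥ 21), if_pos (by omega : x ≥ 41), if_pos (by omega : x ≥ 81), if_pos (by omega : x ≥ 161), if_pos (by omega : x ≥ 321), if_pos (by omega : x ≥ 641), if_pos (by omega : x ≥ 1281)]; rfl
  · simp only [List.foldl]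
    rw [if_neg (by omega : ¬ x ≥ 21), if_neg (by omega : ¬ x ≥ 41), if_neg (by omega : ¬ x ≥ 81), if_neg (by omega : ¬ x ≥ 161), if_neg (by omega : ¬ x ≥ 321), if_neg (by omega : ¬ x ≥ 641), if_neg (by omega : ¬ x ≥ 1281)]; rfl

lemma pv_foldl_eq (l : List Int) (acc : List String) :
    l.foldl (fun level x => level ++ [pvStepA x]) acc = acc ++ l.map pvStepB := by
  induction l generalizing acc with
  | nil => simp
  | cons x xs ih =>
    rw [List.foldl_cons, ih, List.map_cons, pvStep_eq, List.append_assoc]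
    rfl

-- ===== VERDICT (by name: the statement is the Claim_ definition above) =====
theorem changeToLevel_spec : Claim_equal_changeToLevel := by
  intro list _
  show changeToLevel list = changeToLevel_alt list
  have := pv_foldl_eq list []
  simpa [changeToLevel, changeToLevel_alt, pvStepA, pvStepB] using this
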